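-- pv_equiv track=rewrite | github.com/Aca5126/gurisan-trengkas-backend | core/accuracy.py | find_mistakes
-- ===== SOURCE A (Python) =====
-- def find_mistakes(expected_text: str, detected_text: str):
--     """
--     Kenal pasti huruf yang tidak sepadan.
--
--     Contoh:
--     expected: makan
--     detected: makin
--
--     mistakes = ["Huruf ke-4 sepatutnya 'a' tetapi AI baca 'i'"]
--     """
--
--     mistakes = []
--
--     if not detected_text:
--         return ["AI tidak dapat membaca tulisan."]
--
--     expected = expected_text.strip().lower()
--     detected = detected_text.strip().lower()
--
--     length = min(len(expected), len(detected))
--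
--     for i in range(length):
--         if expected[i] != detected[i]:
--             mistakes.append(
--                 f"Huruf ke-{i+1} sepatutnya '{expected[i]}' tetapi AI baca '{detected[i]}'"
--             )
--
--     # Jika detected lebih pendek
--     if len(detected) < len(expected):
--         for i in range(len(detected), len(expected)):
--             mistakes.append(
--                 f"Huruf ke-{i+1} sepatutnya '{expected[i]}' tetapi tiada bacaan daripada AI"
--             )
--
--     return mistakes
-- ===== SOURCE B (Python) =====
-- def find_mistakes(expected_text: str, detected_text: str):
--     # Divide-and-conquer: split the expected text in half, recurse on the two
--     # halves (with the detected text split at the same point), concatenate.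
--     if not detected_text:
--         return ["AI tidak dapat membaca tulisan."]
--
--     def solve(e, d, base):
--         n = len(e)
--         if n == 0:
--             return []
--         if n == 1:
--             if d:
--                 if e[0] != d[0]:
--                     return [
--                         f"Huruf ke-{base+1} sepatutnya '{e[0]}' tetapi AI baca '{d[0]}'"
--                     ]
--                 return []
--             return [
--                 f"Huruf ke-{base+1} sepatutnya '{e[0]}' tetapi tiada bacaan daripada AI"
--             ]
--         m = n // 2
--         return solve(e[:m], d[:m], base) + solve(e[m:], d[m:], base + m)
--
--     return solve(expected_text.strip().lower(), detected_text.strip().lower(), 0)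
-- ===== Notes on version B (the rewrite author's own statement) =====
-- stated objective: alternative
-- what changed: Replaces A's two index loops (range-based mismatch scan over the common prefix plus a second range loop for the missing tail) by a divide-and-conquer recursion that halves the expected text, recurses on the two halves with the detected text split at the same point, and concatenates the results.
import Mathlib
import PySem

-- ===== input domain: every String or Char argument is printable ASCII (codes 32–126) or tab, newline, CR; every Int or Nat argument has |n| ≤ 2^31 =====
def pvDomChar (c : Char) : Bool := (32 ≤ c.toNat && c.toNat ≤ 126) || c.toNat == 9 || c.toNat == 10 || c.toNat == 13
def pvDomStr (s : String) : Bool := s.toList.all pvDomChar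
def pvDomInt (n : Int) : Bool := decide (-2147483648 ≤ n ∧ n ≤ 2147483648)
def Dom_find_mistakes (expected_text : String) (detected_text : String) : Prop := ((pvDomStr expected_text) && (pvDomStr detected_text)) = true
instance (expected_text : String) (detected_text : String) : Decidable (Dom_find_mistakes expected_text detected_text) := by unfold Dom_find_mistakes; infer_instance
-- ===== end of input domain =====

-- B replaces A's two index loops by a divide-and-conquer recursion that halves the expected
-- text and concatenates the two recursive results — objective: alternative algorithm.

-- the two f-string messages (shared text of both programs)
def pvMsgWrong (i : Int) (e d : Char) : String :=
  String.ofList ("Huruf ke-".toList ++ PySem.Int.toChars (i + 1) ++ " sepatutnya '".toList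
    ++ [e] ++ "' tetapi AI baca '".toList ++ [d] ++ "'".toList)

def pvMsgMissing (i : Int) (e : Char) : String :=
  String.ofList ("Huruf ke-".toList ++ PySem.Int.toChars (i + 1) ++ " sepatutnya '".toList
    ++ [e] ++ "' tetapi tiada bacaan daripada AI".toList)

-- ===== PORT A =====
def find_mistakes (expected_text : String) (detected_text : String) : List String :=
  if detected_text.toList = [] then ["AI tidak dapat membaca tulisan."]
  else
    let expected := PySem.Chars.lower (PySem.Chars.strip expected_text.toList)
    let detected := PySem.Chars.lower (PySem.Chars.strip detected_text.toList)
    let length : Int := min (PySem.List.len expected) (PySem.List.len detected)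
    -- first loop: compare the common prefix (expected[i]/detected[i] are in range: pyGetD's default is never used)
    let mistakes := (PySem.List.pyRange 0 length).foldl
      (fun acc i =>
        if PySem.List.pyGetD expected i ' ' ≠ PySem.List.pyGetD detected i ' ' then
          acc ++ [pvMsgWrong i (PySem.List.pyGetD expected i ' ') (PySem.List.pyGetD detected i ' ')]
        else acc) []
    -- second loop: detected shorter than expected
    if PySem.List.len detected < PySem.List.len expected then
      (PySem.List.pyRange (PySem.List.len detected) (PySem.List.len expected)).foldl
        (fun acc i => acc ++ [pvMsgMissing i (PySem.List.pyGetD expected i ' ')]) mistakes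
    else mistakes

-- ===== PORT B =====
-- the recursive helper 'solve' of Source B, step for step (e[0]/d[0] are guarded non-empty in Source B,
-- so pyGetD's default is never used; e[:m]/e[m:] are PySem slices)
def pvSolve (e d : List Char) (base : Int) : List String :=
  let n : Int := PySem.List.len e
  if n = 0 then []
  else if n = 1 then
    if d ≠ [] then
      if PySem.List.pyGetD e 0 ' ' ≠ PySem.List.pyGetD d 0 ' ' then
        [pvMsgWrong base (PySem.List.pyGetD e 0 ' ') (PySem.List.pyGetD d 0 ' ')]
      else []
    else [pvMsgMissing base (PySem.List.pyGetD e 0 ' ')]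
  else
    let m : Int := PySem.Int.floordiv n 2
    pvSolve (PySem.List.slice e none (some m)) (PySem.List.slice d none (some m)) base ++
    pvSolve (PySem.List.slice e (some m) none) (PySem.List.slice d (some m) none) (base + m)
termination_by e.length
decreasing_by
  · rename_i hn0 hn1
    have hm : PySem.Int.floordiv (PySem.List.len e) 2 = ((e.length / 2 : Nat) : Int) := by
      simp only [PySem.List.len]; exact_mod_cast PySem.Int.floordiv_natCast e.length 2
    have hne0 : (e.length : Int) ≠ 0 := hn0
    have hne1 : (e.length : Int) ≠ 1 := hn1
    rw [hm, PySem.List.slice_to_natCast, List.length_take]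
    omega
  · rename_i hn0 hn1
    have hm : PySem.Int.floordiv (PySem.List.len e) 2 = ((e.length / 2 : Nat) : Int) := by
      simp only [PySem.List.len]; exact_mod_cast PySem.Int.floordiv_natCast e.length 2
    have hne0 : (e.length : Int) ≠ 0 := hn0
    have hne1 : (e.length : Int) ≠ 1 := hn1
    rw [hm, PySem.List.slice_from_natCast, List.length_drop]
    omega

def find_mistakes_alt (expected_text : String) (detected_text : String) : List String :=
  if detected_text.toList = [] then ["AI tidak dapat membaca tulisan."]
  else
    pvSolve (PySem.Chars.lower (PySem.Chars.strip expected_text.toList))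
            (PySem.Chars.lower (PySem.Chars.strip detected_text.toList)) 0

-- ===== PRECONDITION & SPEC =====
def Spec_find_mistakes (expected_text : String) (detected_text : String) (out : List String) : Prop := out = find_mistakes_alt expected_text detected_text
instance (expected_text : String) (detected_text : String) (out : List String) : Decidable (Spec_find_mistakes expected_text detected_text out) := by unfold Spec_find_mistakes; infer_instance

-- ===== CLAIM (what is proved, stated in full; the proofs are below) =====
def Claim_equal_find_mistakes : Prop := ∀ (expected_text : String) (detected_text : String), Dom_find_mistakes expected_text detected_text → Spec_find_mistakes expected_text detected_text (find_mistakes expected_text detected_text)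

-- ===== LEMMAS AND PROOFS =====

-- per-index message block, Int index (A's two loop bodies merged; used to characterise A)
def pvH (e d : List Char) (i j : Int) : List String :=
  if j < PySem.List.len d then
    if PySem.List.pyGetD e j ' ' ≠ PySem.List.pyGetD d j ' ' then
      [pvMsgWrong (i + j) (PySem.List.pyGetD e j ' ') (PySem.List.pyGetD d j ' ')]
    else []
  else [pvMsgMissing (i + j) (PySem.List.pyGetD e j ' ')]

-- per-index message block, Nat index (the common reference both ports are reduced to)
def pvHn (e d : List Char) (base : Int) (k : Nat) : List String :=
  if k < d.length then
    if e.getD k ' ' ≠ d.getD k ' ' then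
      [pvMsgWrong (base + k) (e.getD k ' ') (d.getD k ' ')]
    else []
  else [pvMsgMissing (base + k) (e.getD k ' ')]

lemma pvA1_flatMap (e d : List Char) (L : Int) :
    (PySem.List.pyRange 0 L).foldl
      (fun acc i =>
        if PySem.List.pyGetD e i ' ' ≠ PySem.List.pyGetD d i ' ' then
          acc ++ [pvMsgWrong i (PySem.List.pyGetD e i ' ') (PySem.List.pyGetD d i ' ')]
        else acc) [] =
    (PySem.List.pyRange 0 L).flatMap (fun i =>
      if PySem.List.pyGetD e i ' ' ≠ PySem.List.pyGetD d i ' ' then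
        [pvMsgWrong i (PySem.List.pyGetD e i ' ') (PySem.List.pyGetD d i ' ')]
      else []) := by
  rw [PySem.List.foldl_congr_mem _ _
      (fun acc j => acc ++ (if PySem.List.pyGetD e j ' ' ≠ PySem.List.pyGetD d j ' ' then
        [pvMsgWrong j (PySem.List.pyGetD e j ' ') (PySem.List.pyGetD d j ' ')] else [])) []
      (by intro acc x _; split_ifs <;> simp_all)]
  simpa using PySem.List.foldl_append_eq_flatMap _ _ ([] : List String)

lemma pvA2_flatMap (e : List Char) (a b : Int) (init : List String) :
    (PySem.List.pyRange a b).foldl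
      (fun acc i => acc ++ [pvMsgMissing i (PySem.List.pyGetD e i ' ')]) init =
    init ++ (PySem.List.pyRange a b).flatMap (fun i => [pvMsgMissing i (PySem.List.pyGetD e i ' ')]) := by
  exact PySem.List.foldl_append_eq_flatMap _ _ init

-- A's core (the two loops on the stripped/lowered lists) = one flatMap of pvH at base index 0
lemma pv_coreA (e d : List Char) :
    (let length : Int := min (PySem.List.len e) (PySem.List.len d)
     let mistakes := (PySem.List.pyRange 0 length).foldl
      (fun acc i =>
        if PySem.List.pyGetD e i ' ' ≠ PySem.List.pyGetD d i ' ' then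
          acc ++ [pvMsgWrong i (PySem.List.pyGetD e i ' ') (PySem.List.pyGetD d i ' ')]
        else acc) []
     if PySem.List.len d < PySem.List.len e then
      (PySem.List.pyRange (PySem.List.len d) (PySem.List.len e)).foldl
        (fun acc i => acc ++ [pvMsgMissing i (PySem.List.pyGetD e i ' ')]) mistakes
     else mistakes) =
    (PySem.List.pyRange 0 (PySem.List.len e)).flatMap (pvH e d 0) := by
  simp only [pvA1_flatMap]
  have hd0 : (0:Int) ≤ PySem.List.len d := by simp [PySem.List.len]
  have he0 : (0:Int) ≤ PySem.List.len e := by simp [PySem.List.len]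
  by_cases h : PySem.List.len d < PySem.List.len e
  · have hmin : min (PySem.List.len e) (PySem.List.len d) = PySem.List.len d := by omega
    rw [if_pos h, hmin, pvA2_flatMap]
    rw [PySem.List.pyRange_one_append 0 (PySem.List.len d) (PySem.List.len e) hd0 (le_of_lt h),
        List.flatMap_append]
    congr 1
    · exact List.flatMap_congr (by
        intro x hx
        rcases PySem.List.mem_pyRange_one.mp hx with ⟨_, hlt⟩
        simp only [pvH]; rw [if_pos hlt]; simp)
    · exact (List.flatMap_congr (by
        intro x hx
        rcases PySem.List.mem_pyRange_one.mp hx with ⟨hge, _⟩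
        simp only [pvH]; rw [if_neg (not_lt.mpr hge)]; simp)).symm
  · have hmin : min (PySem.List.len e) (PySem.List.len d) = PySem.List.len e := by omega
    rw [if_neg h, hmin]
    exact List.flatMap_congr (by
      intro x hx
      rcases PySem.List.mem_pyRange_one.mp hx with ⟨_, hlt⟩
      have hxd : x < PySem.List.len d := by omega
      simp only [pvH]; rw [if_pos hxd]; simp)

-- the Int-indexed flatMap is the Nat-indexed one
lemma pvH_to_pvHn (e d : List Char) :
    (PySem.List.pyRange 0 (PySem.List.len e)).flatMap (pvH e d 0) =
    (List.range e.length).flatMap (pvHn e d 0) := by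
  rw [PySem.List.pyRange_one]
  have h1 : ((PySem.List.len e) - 0).toNat = e.length := by simp [PySem.List.len]
  rw [h1, List.flatMap_map]
  refine List.flatMap_congr ?_
  intro k _
  simp only [pvH, pvHn, PySem.List.len, PySem.List.pyGetD_natCast, zero_add, Nat.cast_lt]

-- slicing the detected list at the split point commutes with the per-index block: left half
lemma pvHn_take (e d : List Char) (base : Int) (m k : Nat) (hk : k < m) :
    pvHn (e.take m) (d.take m) base k = pvHn e d base k := by
  simp only [pvHn, List.length_take, List.getD_eq_getElem?_getD, List.getElem?_take]
  have hiff : (k < min m d.length) ↔ (k < d.length) := by omega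
  simp only [if_pos hk]
  by_cases h : k < d.length
  · rw [if_pos (hiff.mpr h), if_pos h]
  · rw [if_neg (fun hc => h (hiff.mp hc)), if_neg h]

-- and the right half: index k in the dropped lists is index m + k in the originals
lemma pvHn_drop (e d : List Char) (base : Int) (m k : Nat) :
    pvHn (e.drop m) (d.drop m) (base + (m : Int)) k = pvHn e d base (m + k) := by
  simp only [pvHn, List.length_drop, List.getD_eq_getElem?_getD, List.getElem?_drop]
  have hiff : (k < d.length - m) ↔ (m + k < d.length) := by omega
  have hidx : base + (m : Int) + (k : Nat) = base + ((m + k : Nat) : Int) := by push_cast; ring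
  by_cases h : k < d.length - m
  · rw [if_pos h, if_pos (hiff.mp h), hidx]
  · rw [if_neg h, if_neg (fun hc => h (hiff.mpr hc)), hidx]

-- B's divide-and-conquer computes the Nat-indexed flatMap, at any base index
lemma pvSolve_eq (n : Nat) : ∀ (e d : List Char) (base : Int), e.length = n →
    pvSolve e d base = (List.range e.length).flatMap (pvHn e d base) := by
  induction n using Nat.strong_induction_on with
  | _ n ih =>
    intro e d base hn
    rw [pvSolve]
    simp only [PySem.List.len]
    by_cases h0 : e.length = 0
    · rw [if_pos (by exact_mod_cast h0)]
      simp [h0]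
    · rw [if_neg (by exact_mod_cast h0)]
      by_cases h1 : e.length = 1
      · rw [if_pos (by exact_mod_cast h1)]
        rw [h1, List.range_one, List.flatMap_cons, List.flatMap_nil, List.append_nil]
        simp only [pvHn, Nat.cast_zero, add_zero, PySem.List.pyGetD_zero,
          List.getD_eq_getElem?_getD]
        by_cases hd : d = []
        · subst hd; simp
        · have hdl : 0 < d.length := by
            cases d with | nil => exact absurd rfl hd | cons x t => simp
          rw [if_pos (show d ≠ [] from hd), if_pos hdl]
      · rw [if_neg (by exact_mod_cast h1)]
        have hm : PySem.Int.floordiv ((e.length : Int)) 2 = ((e.length / 2 : Nat) : Int) := by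
          exact_mod_cast PySem.Int.floordiv_natCast e.length 2
        set mn : Nat := e.length / 2 with hmn
        have hmn1 : 1 ≤ mn := by omega
        have hmnlt : mn < e.length := by omega
        rw [hm, PySem.List.slice_to_natCast, PySem.List.slice_to_natCast,
            PySem.List.slice_from_natCast, PySem.List.slice_from_natCast]
        rw [ih mn (by omega) (e.take mn) (d.take mn) base (by simp; omega),
            ih (e.length - mn) (by omega) (e.drop mn) (d.drop mn) (base + (mn : Int)) (by simp)]
        have hsplit : e.length = mn + (e.length - mn) := by omega
        rw [List.length_take, min_eq_left (le_of_lt hmnlt), List.length_drop]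
        conv_rhs => rw [hsplit, List.range_add, List.flatMap_append, List.flatMap_map]
        congr 1
        · exact List.flatMap_congr (by
            intro k hk
            exact pvHn_take e d base mn k (List.mem_range.mp hk))
        · exact List.flatMap_congr (by
            intro k _
            exact pvHn_drop e d base mn k)

-- ===== VERDICT (by name: the statement is the Claim_ definition above) =====
theorem find_mistakes_spec : Claim_equal_find_mistakes := by
  intro expected_text detected_text _
  unfold Spec_find_mistakes find_mistakes find_mistakes_alt
  by_cases hempty : detected_text.toList = []
  · simp [hempty]
  · simp only [hempty, if_false]
    rw [pv_coreA, pvH_to_pvHn, pvSolve_eq _ _ _ _ rfl]
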